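-- pv_equiv track=rewrite | github.com/CriticalNoob02/snake-terminal | actions/validations.py | EndBody
-- ===== SOURCE A (Python) =====
-- def EndBody(worm):
--     """Verificação de corpo
--         --
--         Função responsável por verificar se o próximo movimento pode ser as coordenasdas do seu próprio corpo.
--
--         retorna `validação = {'Up': True, 'Right': True, 'Bottom': True, 'Left': True}`
--     """
--     l = worm[0]['Linha']
--     c = worm[0]['Coluna']
--
--     validation = {'Up': True, 'Right': True, 'Bottom': True, 'Left': True}
--
--     up = {'Coluna':c-1 ,'Linha':l }
--     right = {'Coluna':c ,'Linha': l+1 }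
--     bottom = {'Coluna':c+1 ,'Linha': l }
--     left = {'Coluna':c ,'Linha': l-1 }
--
--     for i in range(len(worm)):
--         if worm[i] == up:
--             validation['Up'] = False
--         elif worm[i] == right:
--             validation['Right'] = False
--         elif worm[i] == bottom:
--             validation['Bottom'] = False
--         elif worm[i] == left:
--             validation['Left'] = False
--         else:
--             pass
--
--     return validation
-- ===== SOURCE B (Python) =====
-- def EndBody(worm):
--     """Same check, written declaratively: compute the four neighbour cells of the
--     head and answer each direction with one membership query against the body."""
--     head = worm[0]
--     l = head['Linha']
--     c = head['Coluna']
--     neighbors = {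
--         'Up':     {'Coluna': c - 1, 'Linha': l},
--         'Right':  {'Coluna': c,     'Linha': l + 1},
--         'Bottom': {'Coluna': c + 1, 'Linha': l},
--         'Left':   {'Coluna': c,     'Linha': l - 1},
--     }
--     return {name: nb not in worm for name, nb in neighbors.items()}
-- ===== Notes on version B (the rewrite author's own statement) =====
-- stated objective: idiomatic
-- what changed: Replaces the index loop that mutates four flags through an elif chain by a declarative dict comprehension: the four neighbour dicts are built once and each direction is one 'nb not in worm' membership query.
import Mathlib
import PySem

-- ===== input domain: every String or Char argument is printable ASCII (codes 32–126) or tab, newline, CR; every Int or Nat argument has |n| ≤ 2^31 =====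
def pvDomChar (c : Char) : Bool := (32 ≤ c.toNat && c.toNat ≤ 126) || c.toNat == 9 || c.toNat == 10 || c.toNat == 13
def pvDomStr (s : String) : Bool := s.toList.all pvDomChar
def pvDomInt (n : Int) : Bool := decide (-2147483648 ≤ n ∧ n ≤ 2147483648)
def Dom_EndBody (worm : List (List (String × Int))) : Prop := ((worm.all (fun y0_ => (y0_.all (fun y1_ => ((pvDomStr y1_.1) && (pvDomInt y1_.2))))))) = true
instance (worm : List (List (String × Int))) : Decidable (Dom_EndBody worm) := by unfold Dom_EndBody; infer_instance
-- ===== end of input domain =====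

-- B replaces A's flag-mutating elif scan by four declarative membership queries ('neighbour not in worm'); idiomatic, same cost.

-- ===== PORT A =====
-- Python's '==' on two dicts ignores order: for a unique-key segment (dicts always
-- have unique keys) it equals a two-key dict {Coluna: col, Linha: lin} iff it has
-- exactly two entries and looks those two values up.  Exact on unique-key segments.
def pyDictEq (seg : List (String × Int)) (col lin : Int) : Bool :=
  seg.length == 2 && List.lookup "Coluna" seg == some col && List.lookup "Linha" seg == some lin

-- the body of A's 'for i in range(len(worm))' loop (reads worm[i] in order)
def endBodyStep (l c : Int) (v : PySem.Dict String Bool) (seg : List (String × Int)) : PySem.Dict String Bool :=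
  if pyDictEq seg (c - 1) l then v.insert "Up" false
  else if pyDictEq seg c (l + 1) then v.insert "Right" false
  else if pyDictEq seg (c + 1) l then v.insert "Bottom" false
  else if pyDictEq seg c (l - 1) then v.insert "Left" false
  else v

def EndBody (worm : List (List (String × Int))) : List (String × Bool) :=
  match worm with
  | [] => []  -- worm[0] raises IndexError: outside Pre_
  | h :: _ =>
    match List.lookup "Linha" h, List.lookup "Coluna" h with
    | some l, some c =>
      let validation : PySem.Dict String Bool :=
        PySem.Dict.ofList [("Up", true), ("Right", true), ("Bottom", true), ("Left", true)]
      (worm.foldl (endBodyStep l c) validation).items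
    | _, _ => []  -- KeyError on worm[0]['Linha'/'Coluna']: outside Pre_

-- ===== PORT B =====
def EndBody_alt (worm : List (List (String × Int))) : List (String × Bool) :=
  let h := worm.headI
  let ol := List.lookup "Linha" h
  let oc := List.lookup "Coluna" h
  if worm.isEmpty ∨ ol = none ∨ oc = none then []  -- IndexError / KeyError region: outside Pre_
  else
    let l := ol.getD 0
    let c := oc.getD 0
    let neighbors : List (String × (Int × Int)) :=
      [("Up", (c - 1, l)), ("Right", (c, l + 1)), ("Bottom", (c + 1, l)), ("Left", (c, l - 1))]
    -- 'nb not in worm' is list membership under Python's dict '==' (= pyDictEq)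
    neighbors.map (fun p => (p.1, !(worm.any (fun seg => pyDictEq seg p.2.1 p.2.2))))

-- ===== PRECONDITION & SPEC =====
-- Exactly where A returns: a nonempty worm whose head carries both keys
-- (otherwise worm[0] / worm[0]['Linha'] / worm[0]['Coluna'] raises).
def Pre_EndBody (worm : List (List (String × Int))) : Prop :=
  worm ≠ [] ∧ (List.lookup "Linha" worm.headI).isSome ∧ (List.lookup "Coluna" worm.headI).isSome
instance (worm : List (List (String × Int))) : Decidable (Pre_EndBody worm) := by unfold Pre_EndBody; infer_instance

def pvWitness_EndBody : (List (List (String × Int))) := [[("Linha", 0), ("Coluna", 0)]]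

def Spec_EndBody (worm : List (List (String × Int))) (out : List (String × Bool)) : Prop := out = EndBody_alt worm
instance (worm : List (List (String × Int))) (out : List (String × Bool)) : Decidable (Spec_EndBody worm out) := by unfold Spec_EndBody; infer_instance

-- ===== CLAIM (what is proved, stated in full; the proofs are below) =====
def Claim_equal_EndBody : Prop := ∀ (worm : List (List (String × Int))), Dom_EndBody worm → Pre_EndBody worm → Spec_EndBody worm (EndBody worm)

-- ===== LEMMAS AND PROOFS =====

-- a segment equals at most one of the four (pairwise distinct) neighbour cells
lemma pyDictEq_unique {seg : List (String × Int)} {col lin col' lin' : Int}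
    (h1 : pyDictEq seg col lin = true) (h2 : pyDictEq seg col' lin' = true) :
    col = col' ∧ lin = lin' := by
  simp only [pyDictEq, Bool.and_eq_true, beq_iff_eq] at h1 h2
  obtain ⟨⟨-, hc⟩, hl⟩ := h1
  obtain ⟨⟨-, hc'⟩, hl'⟩ := h2
  rw [hc] at hc'; rw [hl] at hl'
  exact ⟨Option.some.inj hc', Option.some.inj hl'⟩

lemma pyDictEq_excl {seg : List (String × Int)} {col lin col' lin' : Int}
    (h : pyDictEq seg col lin = true) (hne : ¬(col = col' ∧ lin = lin')) :
    pyDictEq seg col' lin' = false := by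
  rcases Bool.eq_false_or_eq_true (pyDictEq seg col' lin') with ht | hf
  · exact absurd (pyDictEq_unique h ht) hne
  · exact hf

-- A's loop, characterised: each flag is and-ed with "no segment matches that cell"
lemma endBody_loop (l c : Int) (ws : List (List (String × Int))) (a b d e : Bool) :
    ws.foldl (endBodyStep l c) (PySem.Dict.mk [("Up", a), ("Right", b), ("Bottom", d), ("Left", e)])
    = PySem.Dict.mk [("Up", a && !(ws.any (fun s => pyDictEq s (c - 1) l))),
                     ("Right", b && !(ws.any (fun s => pyDictEq s c (l + 1)))),
                     ("Bottom", d && !(ws.any (fun s => pyDictEq s (c + 1) l))),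
                     ("Left", e && !(ws.any (fun s => pyDictEq s c (l - 1))))] := by
  induction ws generalizing a b d e with
  | nil => simp
  | cons s rest ih =>
    simp only [List.foldl_cons, List.any_cons, endBodyStep]
    by_cases h1 : pyDictEq s (c - 1) l = true
    · have e2 : pyDictEq s c (l + 1) = false := pyDictEq_excl h1 (by rintro ⟨hx, hy⟩; omega)
      have e3 : pyDictEq s (c + 1) l = false := pyDictEq_excl h1 (by rintro ⟨hx, hy⟩; omega)
      have e4 : pyDictEq s c (l - 1) = false := pyDictEq_excl h1 (by rintro ⟨hx, hy⟩; omega)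
      rw [if_pos h1, show (PySem.Dict.mk [("Up", a), ("Right", b), ("Bottom", d), ("Left", e)]).insert "Up" false
          = PySem.Dict.mk [("Up", false), ("Right", b), ("Bottom", d), ("Left", e)] by rfl, ih]
      simp [h1, e2, e3, e4]
    · rw [if_neg h1]
      by_cases h2 : pyDictEq s c (l + 1) = true
      · have e3 : pyDictEq s (c + 1) l = false := pyDictEq_excl h2 (by rintro ⟨hx, hy⟩; omega)
        have e4 : pyDictEq s c (l - 1) = false := pyDictEq_excl h2 (by rintro ⟨hx, hy⟩; omega)
        rw [if_pos h2, show (PySem.Dict.mk [("Up", a), ("Right", b), ("Bottom", d), ("Left", e)]).insert "Right" false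
            = PySem.Dict.mk [("Up", a), ("Right", false), ("Bottom", d), ("Left", e)] by rfl, ih]
        simp [Bool.eq_false_iff.mpr h1, h2, e3, e4]
      · rw [if_neg h2]
        by_cases h3 : pyDictEq s (c + 1) l = true
        · have e4 : pyDictEq s c (l - 1) = false := pyDictEq_excl h3 (by rintro ⟨hx, hy⟩; omega)
          rw [if_pos h3, show (PySem.Dict.mk [("Up", a), ("Right", b), ("Bottom", d), ("Left", e)]).insert "Bottom" false
              = PySem.Dict.mk [("Up", a), ("Right", b), ("Bottom", false), ("Left", e)] by rfl, ih]
          simp [Bool.eq_false_iff.mpr h1, Bool.eq_false_iff.mpr h2, h3, e4]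
        · rw [if_neg h3]
          by_cases h4 : pyDictEq s c (l - 1) = true
          · rw [if_pos h4, show (PySem.Dict.mk [("Up", a), ("Right", b), ("Bottom", d), ("Left", e)]).insert "Left" false
                = PySem.Dict.mk [("Up", a), ("Right", b), ("Bottom", d), ("Left", false)] by rfl, ih]
            simp [Bool.eq_false_iff.mpr h1, Bool.eq_false_iff.mpr h2, Bool.eq_false_iff.mpr h3, h4]
          · rw [if_neg h4, ih]
            simp [Bool.eq_false_iff.mpr h1, Bool.eq_false_iff.mpr h2,
                  Bool.eq_false_iff.mpr h3, Bool.eq_false_iff.mpr h4]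

-- ===== VERDICT (by name: the statement is the Claim_ definition above) =====
theorem EndBody_spec : Claim_equal_EndBody := by
  intro worm _ hpre
  obtain ⟨hne, hl, hc⟩ := hpre
  match worm with
  | [] => exact absurd rfl hne
  | h :: t =>
    simp only [List.headI] at hl hc
    obtain ⟨l, hl⟩ := Option.isSome_iff_exists.mp hl
    obtain ⟨c, hc⟩ := Option.isSome_iff_exists.mp hc
    show EndBody (h :: t) = EndBody_alt (h :: t)
    simp only [EndBody, EndBody_alt, List.headI, List.isEmpty_cons, hl, hc]
    rw [if_neg (by simp)]
    simp only [Option.getD_some]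
    rw [show (PySem.Dict.ofList [("Up", true), ("Right", true), ("Bottom", true), ("Left", true)] : PySem.Dict String Bool)
        = PySem.Dict.mk [("Up", true), ("Right", true), ("Bottom", true), ("Left", true)] by rfl]
    rw [endBody_loop]
    simp
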